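-- pv_equiv track=rewrite | github.com/AidanSYu/Atlas-OS | src/backend/app/atlas_plugin_system/registry.py | _resolve_archive_member
-- ===== SOURCE A (Python) =====
-- from typing import Any, Dict, List, Optional
--
-- def _resolve_archive_member(names: List[str], target_name: str) -> Optional[str]:
--     direct_matches = [name for name in names if name.rstrip("/") == target_name]
--     if direct_matches:
--         return direct_matches[0]
--
--     suffix = "/" + target_name
--     nested_matches = [name for name in names if name.endswith(suffix)]
--     if nested_matches:
--         nested_matches.sort(key=len)
--         return nested_matches[0]
--
--     return None
-- ===== SOURCE B (Python) =====
-- def _resolve_archive_member(names, target_name):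
--     suffix = "/" + target_name
--     first_direct = None
--     shortest_nested = None
--     for name in names:
--         if first_direct is None and name.rstrip("/") == target_name:
--             first_direct = name
--         if name.endswith(suffix):
--             if shortest_nested is None or len(name) < len(shortest_nested):
--                 shortest_nested = name
--     return first_direct if first_direct is not None else shortest_nested
-- ===== Notes on version B (the rewrite author's own statement) =====
-- stated objective: alternative
-- what changed: Replaced the two filtering list-comprehensions plus a stable sort with a single pass over names maintaining the first direct match and the first shortest nested match.
import Mathlib
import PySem

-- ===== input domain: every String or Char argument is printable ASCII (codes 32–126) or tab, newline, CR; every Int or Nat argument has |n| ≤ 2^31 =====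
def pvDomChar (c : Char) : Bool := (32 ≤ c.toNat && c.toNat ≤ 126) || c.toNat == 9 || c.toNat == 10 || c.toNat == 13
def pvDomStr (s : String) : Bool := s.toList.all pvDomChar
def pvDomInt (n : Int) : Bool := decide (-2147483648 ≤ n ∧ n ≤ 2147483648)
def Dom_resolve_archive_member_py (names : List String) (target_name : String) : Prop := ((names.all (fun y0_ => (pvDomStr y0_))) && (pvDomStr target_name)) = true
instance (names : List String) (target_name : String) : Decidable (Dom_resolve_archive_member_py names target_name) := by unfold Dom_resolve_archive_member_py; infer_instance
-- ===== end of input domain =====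

-- B replaces the two list-comprehensions and the stable sort of A by a single pass that
-- maintains the first direct match and the first shortest nested match (objective: alternative).

-- ===== PORT A =====
-- s.rstrip("/"): drop trailing '/' characters (exact: the chars argument is the single char '/')
def rstripSlash (s : String) : String := String.ofList ((s.toList.reverse.dropWhile (· == '/')).reverse)

def resolve_archive_member_py (names : List String) (target_name : String) : Option String :=
  let direct_matches := names.filter (fun name => rstripSlash name == target_name)
  if direct_matches.isEmpty = false then direct_matches[0]?
  else
    let suffix := "/" ++ target_name
    let nested_matches := names.filter (fun name => PySem.Str.endswith name suffix)
    if nested_matches.isEmpty = false then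
      (PySem.List.sorted nested_matches (fun n => PySem.Str.len n) false)[0]?
    else none

-- ===== PORT B =====
def resolve_archive_member_py_alt (names : List String) (target_name : String) : Option String :=
  let suffix := "/" ++ target_name
  let st := names.foldl (fun (st : Option String × Option String) name =>
      ( if st.1.isNone && (rstripSlash name == target_name) then some name else st.1,
        if PySem.Str.endswith name suffix then
          match st.2 with
          | none => some name
          | some b => if PySem.Str.len name < PySem.Str.len b then some name else st.2
        else st.2 ))
    (none, none)
  match st.1 with
  | some d => some d
  | none => st.2

-- ===== PRECONDITION & SPEC =====
def Spec_resolve_archive_member_py (names : List String) (target_name : String) (out : Option String) : Prop := out = resolve_archive_member_py_alt names target_name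
instance (names : List String) (target_name : String) (out : Option String) : Decidable (Spec_resolve_archive_member_py names target_name out) := by unfold Spec_resolve_archive_member_py; infer_instance

-- ===== CLAIM (what is proved, stated in full; the proofs are below) =====
def Claim_equal_resolve_archive_member_py : Prop := ∀ (names : List String) (target_name : String), Dom_resolve_archive_member_py names target_name → Spec_resolve_archive_member_py names target_name (resolve_archive_member_py names target_name)

-- ===== LEMMAS AND PROOFS =====

-- B's pair fold splits into two independent folds
theorem pv_pairFold (t suf : String) (xs : List String) (a b : Option String) :
    xs.foldl (fun (st : Option String × Option String) name =>
        (if st.1.isNone && (rstripSlash name == t) then some name else st.1,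
         if PySem.Str.endswith name suf then
           match st.2 with
           | none => some name
           | some bb => if PySem.Str.len name < PySem.Str.len bb then some name else st.2
         else st.2)) (a, b)
      = (xs.foldl (fun o name => if o.isNone && (rstripSlash name == t) then some name else o) a,
         xs.foldl (fun o name => if PySem.Str.endswith name suf then
           match o with
           | none => some name
           | some bb => if PySem.Str.len name < PySem.Str.len bb then some name else o
         else o) b) := by
  induction xs generalizing a b with
  | nil => rfl
  | cons x xs ih => simp only [List.foldl]; exact ih _ _

-- the direct fold, once set, stays
theorem pv_directFold_some (xs : List String) (p : String → Bool) (d : String) :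
    xs.foldl (fun o n => if o.isNone && p n then some n else o) (some d) = some d := by
  induction xs with
  | nil => rfl
  | cons x xs ih => simpa using ih

-- the direct fold from none finds the head of the filtered list
theorem pv_directFold (xs : List String) (p : String → Bool) :
    xs.foldl (fun o n => if o.isNone && p n then some n else o) none = (xs.filter p).head? := by
  induction xs with
  | nil => rfl
  | cons x xs ih =>
    simp only [List.foldl, Option.isNone_none, Bool.true_and]
    by_cases h : p x
    · rw [if_pos h, List.filter_cons_of_pos h]
      simp only [List.head?_cons]
      exact pv_directFold_some xs p x
    · rw [if_neg h, List.filter_cons_of_neg (by simpa using h)]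
      exact ih

-- a guarded fold is a fold over the filtered list
theorem pv_condFold (xs : List String) (q : String → Bool)
    (g : Option String → String → Option String) (init : Option String) :
    xs.foldl (fun o n => if q n then g o n else o) init = (xs.filter q).foldl g init := by
  induction xs generalizing init with
  | nil => rfl
  | cons x xs ih => by_cases h : q x <;> simp [List.foldl, h, ih]

-- head of insertBy depends only on the old head
theorem pv_head_insertBy (bef : String → String → Bool) (x : String) (ys : List String) :
    (PySem.List.insertBy bef x ys).head? =
      some (match ys.head? with | none => x | some h => if bef x h then x else h) := by
  cases ys with
  | nil => rfl
  | cons h t => by_cases hb : bef x h <;> simp [PySem.List.insertBy, hb]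

-- head of an insertBy fold is an option fold
theorem pv_headFold (bef : String → String → Bool) (xs acc : List String) :
    (xs.foldl (fun acc x => PySem.List.insertBy bef x acc) acc).head? =
      xs.foldl (fun o x => some (match o with | none => x | some h => if bef x h then x else h))
        acc.head? := by
  induction xs generalizing acc with
  | nil => rfl
  | cons x xs ih =>
    simp only [List.foldl]
    rw [ih, pv_head_insertBy]

-- the head of the stable length sort is B's running minimum
theorem pv_minFold (l : List String) :
    (PySem.List.sorted l (fun n => PySem.Str.len n) false).head? =
      l.foldl (fun o n => match o with
        | none => some n
        | some b => if PySem.Str.len n < PySem.Str.len b then some n else some b) none := by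
  rw [PySem.List.sorted_eq_foldl_insertBy, pv_headFold]
  simp only [List.head?_nil]
  congr 1
  funext o n
  cases o with
  | none => rfl
  | some b => simp only [decide_eq_true_eq]; exact apply_ite some _ _ _

-- main equality: A and B return the same member for every input
theorem pv_main (names : List String) (target_name : String) :
    resolve_archive_member_py names target_name = resolve_archive_member_py_alt names target_name := by
  unfold resolve_archive_member_py resolve_archive_member_py_alt
  simp only [pv_pairFold]
  rw [pv_directFold]
  have hnest : (names.foldl (fun o n =>
      if PySem.Str.endswith n ("/" ++ target_name) then
        match o with
        | none => some n
        | some b => if PySem.Str.len n < PySem.Str.len b then some n else o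
      else o) none) =
      (PySem.List.sorted (names.filter (fun n => PySem.Str.endswith n ("/" ++ target_name)))
        (fun n => PySem.Str.len n) false).head? := by
    rw [pv_minFold, ← pv_condFold]
    congr 1
    funext o n
    by_cases hq : PySem.Str.endswith n ("/" ++ target_name) <;> cases o <;>
      simp only [hq, if_true]
  rw [hnest]
  cases hd : (names.filter (fun name => rstripSlash name == target_name)).head? with
  | some d =>
    have hne : (names.filter (fun name => rstripSlash name == target_name)).isEmpty = false := by
      cases h : names.filter (fun name => rstripSlash name == target_name) <;> simp_all
    rw [if_pos hne, ← List.head?_eq_getElem?, hd]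
  | none =>
    have he : (names.filter (fun name => rstripSlash name == target_name)).isEmpty = true := by
      cases h : names.filter (fun name => rstripSlash name == target_name) <;> simp_all
    rw [if_neg (by simp [he])]
    cases hq : (names.filter (fun n => PySem.Str.endswith n ("/" ++ target_name))).isEmpty with
    | true =>
      have hnil : names.filter (fun n => PySem.Str.endswith n ("/" ++ target_name)) = [] :=
        List.isEmpty_iff.mp hq
      rw [if_neg (by simp), hnil]
      rfl
    | false =>
      rw [if_pos rfl, ← List.head?_eq_getElem?]

-- ===== VERDICT (by name: the statement is the Claim_ definition above) =====
theorem resolve_archive_member_py_spec : Claim_equal_resolve_archive_member_py := by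
  intro names target_name _
  unfold Spec_resolve_archive_member_py
  exact pv_main names target_name
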